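-- pv_equiv track=rewrite | github.com/iansedano/aoc | python/aoc/2015/20.py | part1
-- ===== SOURCE A (Python) =====
-- from collections import defaultdict
--
-- def part1(parsed_input):
--     houses = defaultdict(int)
--
--     house_max = parsed_input // 10
--
--     for elf in range(1, house_max):
--         for visit in range(elf, house_max, elf):
--             houses[visit] += elf * 10
--             if houses[elf] > parsed_input:
--                 return elf
-- ===== SOURCE B (Python) =====
-- def part1(parsed_input):
--     # For each house n in order, sum n's divisors directly by trial division
--     # up to sqrt(n) (divisor pairing); no shared sieve dict is ever built.
--     house_max = parsed_input // 10
--     n = 1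
--     while n < house_max:
--         s = 0
--         d = 1
--         while d * d <= n:
--             if n % d == 0:
--                 s += d
--                 q = n // d
--                 if q != d:
--                     s += q
--             d += 1
--         if 10 * s > parsed_input:
--             return n
--         n += 1
--     return None
-- ===== Notes on version B (the rewrite author's own statement) =====
-- stated objective: alternative
-- what changed: A sieves: every elf walks all its multiples below input//10, accumulating 10*elf into a shared defaultdict and returning the elf whose own entry exceeds the input; B drops the dict entirely and, for each house n in order, computes its divisor sum directly by trial division up to sqrt(n), returning the first n with 10*sigma(n) > input.
import Mathlib
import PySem

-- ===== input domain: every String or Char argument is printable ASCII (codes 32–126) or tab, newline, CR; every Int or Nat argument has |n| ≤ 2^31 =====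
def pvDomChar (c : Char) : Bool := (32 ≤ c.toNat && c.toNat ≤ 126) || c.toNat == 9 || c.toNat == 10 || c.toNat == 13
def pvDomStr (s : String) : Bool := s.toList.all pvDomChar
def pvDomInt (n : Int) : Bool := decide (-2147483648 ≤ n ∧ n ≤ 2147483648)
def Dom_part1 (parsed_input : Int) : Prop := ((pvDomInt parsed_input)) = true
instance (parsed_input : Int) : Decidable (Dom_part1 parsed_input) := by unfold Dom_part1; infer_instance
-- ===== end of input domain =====

-- B replaces A's shared defaultdict sieve (every elf walks all its multiples) by a direct
-- per-house divisor sum via trial division up to sqrt(n); objective: alternative.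

-- ===== PORT A =====
-- inner 'for visit in range(elf, house_max, elf)' loop: updates houses, may 'return elf'
-- (Sum.inr = early return; 'houses[visit] += elf * 10' on a defaultdict(int) is
--  Dict.modify visit 0 (· + elf * 10); 'houses[elf]' in the condition is read as getD elf 0 —
--  exact, since visit = elf has just been written before the first check)
def pvInnerA (pi elf : Int) : List Int → PySem.Dict Int Int → (PySem.Dict Int Int) ⊕ Int
  | [], houses => Sum.inl houses
  | v :: vs, houses =>
    let houses' := houses.modify v 0 (· + elf * 10)
    if houses'.getD elf 0 > pi then Sum.inr elf
    else pvInnerA pi elf vs houses'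

-- outer 'for elf in range(1, house_max)' loop; falling off the end is Python's implicit None
def pvOuterA (pi hm : Int) : List Int → PySem.Dict Int Int → Option Int
  | [], _ => none
  | e :: es, houses =>
    match pvInnerA pi e (PySem.List.pyRange e hm e) houses with
    | Sum.inr r => some r
    | Sum.inl houses' => pvOuterA pi hm es houses'

def part1 (parsed_input : Int) : Option Int :=
  let house_max := PySem.Int.floordiv parsed_input 10
  pvOuterA parsed_input house_max (PySem.List.pyRange 1 house_max 1) PySem.Dict.empty

-- ===== PORT B =====
-- inner 'while d * d <= n' trial-division loop of Source B (the updated running sum s is the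
-- recursive call's argument: s += d, q = n // d, if q != d: s += q); the Nat fuel only
-- bounds the iteration count to make the loop total — it is (n + 1 - d) at entry, which
-- never runs out while d * d ≤ n
def pvDivSumGo (n : Int) : Nat → Int → Int → Int
  | 0, _, s => s
  | fuel + 1, d, s =>
    if d * d ≤ n then
      pvDivSumGo n fuel (d + 1)
        (if PySem.Int.mod n d = 0 then
          let q := PySem.Int.floordiv n d
          if q ≠ d then s + d + q else s + d
        else s)
    else s

def pvDivSum (n d s : Int) : Int := pvDivSumGo n (n + 1 - d).toNat d s

-- outer 'while n < house_max' loop of Source B (fuel = house_max - n at entry, enough for the loop)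
def pvScanBGo (pi hm : Int) : Nat → Int → Option Int
  | 0, _ => none
  | fuel + 1, n =>
    if n < hm then
      if 10 * pvDivSum n 1 0 > pi then some n
      else pvScanBGo pi hm fuel (n + 1)
    else none

def pvScanB (pi hm n : Int) : Option Int := pvScanBGo pi hm (hm - n).toNat n

def part1_alt (parsed_input : Int) : Option Int :=
  let house_max := PySem.Int.floordiv parsed_input 10
  pvScanB parsed_input house_max 1

-- ===== PRECONDITION & SPEC =====
def Spec_part1 (parsed_input : Int) (out : Option Int) : Prop := out = part1_alt parsed_input
instance (parsed_input : Int) (out : Option Int) : Decidable (Spec_part1 parsed_input out) := by unfold Spec_part1; infer_instance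

-- ===== CLAIM (what is proved, stated in full; the proofs are below) =====
def Claim_equal_part1 : Prop := ∀ (parsed_input : Int), Dom_part1 parsed_input → Spec_part1 parsed_input (part1 parsed_input)

-- ===== LEMMAS AND PROOFS =====

-- σ(N), the divisor sum both programs are reduced to
def pvSigma (N : Nat) : Nat := ∑ k ∈ N.divisors, k

-- B's inner loop, started at d, adds the paired divisor sum over d ≤ k ≤ √n
theorem pvDivSum_eq (n : Int) (hn : 1 ≤ n) : ∀ (fuel : Nat) (d s : Int), 1 ≤ d → fuel = (n + 1 - d).toNat →
    pvDivSumGo n fuel d s = s + ↑(∑ k ∈ Finset.Ico d.toNat (Nat.sqrt n.toNat + 1),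
      if k ∣ n.toNat then k + (if n.toNat / k ≠ k then n.toNat / k else 0) else 0) := by
  obtain ⟨N, rfl⟩ : ∃ N : Nat, n = (N : Int) := ⟨n.toNat, (Int.toNat_of_nonneg (by omega)).symm⟩
  intro fuel
  induction fuel with
  | zero =>
    intro d s hd hf
    have hdn : (N : Int) < d := by omega
    simp only [pvDivSumGo]
    have hsq : Nat.sqrt (N : Int).toNat < d.toNat := by
      have h1 : Nat.sqrt (N : Int).toNat ≤ (N : Int).toNat := Nat.sqrt_le_self _
      omega
    rw [Finset.Ico_eq_empty (by omega)]
    simp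
  | succ fuel ih =>
    intro d s hd hf
    obtain ⟨D, rfl⟩ : ∃ D : Nat, d = (D : Int) := ⟨d.toNat, (Int.toNat_of_nonneg (by omega)).symm⟩
    simp only [Int.toNat_natCast] at *
    by_cases hdd : (D : Int) * D ≤ (N : Int)
    · have hddn : D * D ≤ N := by exact_mod_cast hdd
      rw [pvDivSumGo, if_pos hdd]
      rw [ih ((D : Int) + 1) _ (by omega) (by omega)]
      rw [show (((D : Int)) + 1).toNat = D + 1 by omega]
      have hlt : D < Nat.sqrt N + 1 := by
        have := Nat.le_sqrt.mpr hddn; omega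
      rw [Finset.sum_eq_sum_Ico_succ_bot hlt]
      have hdvd_iff : PySem.Int.mod (N : Int) (D : Int) = 0 ↔ D ∣ N := by
        rw [PySem.Int.mod_eq_zero_iff_dvd]; exact Int.natCast_dvd_natCast
      have hq : PySem.Int.floordiv (N : Int) (D : Int) = ((N / D : Nat) : Int) :=
        PySem.Int.floordiv_natCast _ _
      by_cases hv : D ∣ N
      · simp only [if_pos (hdvd_iff.mpr hv), if_pos hv, hq, Int.natCast_div]
        by_cases hne : N / D ≠ D
        · rw [if_pos hne, if_pos (show ((N:Int))/(D:Int) ≠ (D:Int) from by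
            rw [← Int.natCast_div]; exact_mod_cast hne)]
          push_cast; ring
        · rw [if_neg hne, if_neg (show ¬(((N:Int))/(D:Int) ≠ (D:Int)) from by
            rw [← Int.natCast_div]; exact not_not.mpr (by exact_mod_cast not_not.mp hne))]
          push_cast; ring
      · simp only [if_neg (fun hc => hv (hdvd_iff.mp hc)), if_neg hv]
        push_cast; ring
    · rw [pvDivSumGo, if_neg hdd]
      have hddn : ¬ D * D ≤ N := fun hc => hdd (by exact_mod_cast hc)
      have hsq : Nat.sqrt N < D := Nat.sqrt_lt.mpr (by omega)
      rw [Finset.Ico_eq_empty (by omega)]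
      simp

-- divisor pairing: summing d + n/d over divisors d ≤ √n gives the full divisor sum
theorem pvPairSum (N : Nat) (h : 1 ≤ N) :
    (∑ k ∈ Finset.Ico 1 (Nat.sqrt N + 1),
      if k ∣ N then k + (if N / k ≠ k then N / k else 0) else 0) = pvSigma N := by
  have hN0 : N ≠ 0 := by omega
  rw [← Finset.sum_filter]
  have hS : (Finset.Ico 1 (Nat.sqrt N + 1)).filter (· ∣ N)
      = N.divisors.filter (fun k => k * k ≤ N) := by
    ext k
    simp only [Finset.mem_filter, Finset.mem_Ico, Nat.mem_divisors]
    constructor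
    · rintro ⟨⟨h1, h2⟩, h3⟩
      exact ⟨⟨h3, hN0⟩, Nat.le_sqrt.mp (by omega)⟩
    · rintro ⟨⟨h1, _⟩, h2⟩
      have hk1 : 1 ≤ k := Nat.pos_of_dvd_of_pos h1 (by omega)
      exact ⟨⟨hk1, by have := Nat.le_sqrt.mpr h2; omega⟩, h1⟩
  rw [hS, Finset.sum_add_distrib, ← Finset.sum_filter]
  have hbij : ∑ k ∈ (N.divisors.filter (fun k => k * k ≤ N)).filter (fun k => N / k ≠ k), N / k
      = ∑ m ∈ N.divisors.filter (fun k => ¬ k * k ≤ N), m := by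
    refine Finset.sum_nbij' (fun k => N / k) (fun m => N / m) ?_ ?_ ?_ ?_ ?_
    · intro k hk
      simp only [Finset.mem_filter, Nat.mem_divisors] at hk ⊢
      obtain ⟨⟨⟨hdvd, hN0'⟩, hle⟩, hne⟩ := hk
      obtain ⟨c, rfl⟩ := hdvd
      have hk1 : 0 < k := by by_contra hc; simp at hc; subst hc; simp at hN0'
      have hc1 : 0 < c := by by_contra hc; simp at hc; subst hc; simp at hN0'
      have hdiv : k * c / k = c := Nat.mul_div_cancel_left c hk1
      rw [hdiv] at hne ⊢
      have hkc : k < c := by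
        have := Nat.le_of_mul_le_mul_left hle hk1
        omega
      refine ⟨⟨dvd_mul_left c k, hN0'⟩, ?_⟩
      intro hcon
      have : k * c < c * c := (Nat.mul_lt_mul_right hc1).mpr hkc
      omega
    · intro m hm
      simp only [Finset.mem_filter, Nat.mem_divisors] at hm ⊢
      obtain ⟨⟨hdvd, hN0'⟩, hgt⟩ := hm
      obtain ⟨c, rfl⟩ := hdvd
      have hm1 : 0 < m := by by_contra hc; simp at hc; subst hc; simp at hN0'
      have hc1 : 0 < c := by by_contra hc; simp at hc; subst hc; simp at hN0'
      have hdiv : m * c / m = c := Nat.mul_div_cancel_left c hm1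
      rw [hdiv]
      have hcm : c < m := by
        by_contra hcon
        simp at hcon
        exact hgt (Nat.mul_le_mul_left m hcon)
      have hdiv2 : m * c / c = m := Nat.mul_div_cancel m hc1
      refine ⟨⟨⟨dvd_mul_left c m, hN0'⟩, ?_⟩, ?_⟩
      · calc c * c ≤ m * c := Nat.mul_le_mul_right c (by omega)
          _ ≤ m * c := le_rfl
      · rw [hdiv2]; omega
    · intro k hk
      simp only [Finset.mem_filter, Nat.mem_divisors] at hk
      exact Nat.div_div_self hk.1.1.1 hN0
    · intro m hm
      simp only [Finset.mem_filter, Nat.mem_divisors] at hm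
      exact Nat.div_div_self hm.1.1 hN0
    · intro k _
      rfl
  rw [hbij, Finset.sum_filter_add_sum_filter_not]
  rfl

-- B's full inner loop computes σ
theorem pvDivSum_sigma (n : Int) (hn : 1 ≤ n) : pvDivSum n 1 0 = ↑(pvSigma n.toNat) := by
  rw [pvDivSum, pvDivSum_eq n hn ((n + 1 - 1).toNat) 1 0 le_rfl rfl]
  rw [show ((1:Int)).toNat = 1 from rfl, pvPairSum n.toNat (by omega)]
  simp

-- value sitting in houses[x] after elves 1 … k-1 have run in A
-- (elf d contributed d*10 exactly when x ∈ range(d, house_max, d))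
def pvInv (hm k x : Int) : Int :=
  ∑ d ∈ Finset.Ico 1 k.toNat, if (d:Int) ∣ x ∧ (d:Int) ≤ x ∧ x < hm then (d:Int) * 10 else 0

-- a fold of 'modify v 0 (· + c)' adds c per occurrence of the key
theorem pvFoldModify (c : Int) : ∀ (l : List Int) (h : PySem.Dict Int Int) (x : Int),
    (l.foldl (fun h v => h.modify v 0 (· + c)) h).getD x 0 = h.getD x 0 + c * (l.count x : Int)
  | [], h, x => by simp
  | v :: vs, h, x => by
    rw [List.foldl_cons, pvFoldModify c vs]
    rw [PySem.Dict.getD_modify]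
    by_cases hx : x = v
    · subst hx; simp; ring
    · simp [hx, Ne.symm hx]

-- inner loop with the condition already false: no early return, pure accumulation
theorem pvInnerA_run (pi e : Int) : ∀ (vs : List Int) (h : PySem.Dict Int Int), e ∉ vs → h.getD e 0 ≤ pi →
    pvInnerA pi e vs h = Sum.inl (vs.foldl (fun h v => h.modify v 0 (· + e * 10)) h)
  | [], h, _, _ => rfl
  | v :: vs, h, hne, hle => by
    have hv : e ≠ v := fun he => hne (he ▸ List.mem_cons_self)
    have hkey : (h.modify v 0 (· + e * 10)).getD e 0 = h.getD e 0 := by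
      rw [PySem.Dict.getD_modify]; simp [hv]
    rw [pvInnerA]
    simp only [hkey]
    rw [if_neg (by omega)]
    exact pvInnerA_run pi e vs _ (fun hm => hne (List.mem_cons_of_mem _ hm)) (by omega)

-- head step of the inner loop: elf e returns iff houses[e] + e*10 > pi
theorem pvInnerA_cons (pi e : Int) (rest : List Int) (h : PySem.Dict Int Int) (he : e ∉ rest) :
    pvInnerA pi e (e :: rest) h =
      if h.getD e 0 + e * 10 > pi then Sum.inr e
      else Sum.inl ((e :: rest).foldl (fun h v => h.modify v 0 (· + e * 10)) h) := by
  rw [pvInnerA]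
  have hkey : (h.modify e 0 (· + e * 10)).getD e 0 = h.getD e 0 + e * 10 := by
    rw [PySem.Dict.getD_modify]; simp
  simp only [hkey]
  by_cases hc : h.getD e 0 + e * 10 > pi
  · rw [if_pos hc, if_pos hc]
  · rw [if_neg hc, if_neg hc, List.foldl_cons]
    exact pvInnerA_run pi e rest _ he (by omega)

-- range(e, hm, e) with 1 ≤ e < hm: head e, e-free tail, occurrence count = divisibility test
theorem pvVisits (e hm : Int) (h1 : 1 ≤ e) (h2 : e < hm) :
    ∃ rest, PySem.List.pyRange e hm e = e :: rest ∧ e ∉ rest ∧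
      ∀ x, ((e :: rest).count x : Int) = (if (e:Int) ∣ x ∧ e ≤ x ∧ x < hm then 1 else 0) := by
  have hpos : (0:Int) < e := by omega
  have hrange := PySem.List.pyRange_of_pos e hm hpos
  have hcnt : 1 ≤ ((hm - e + e - 1) / e) := by
    rw [Int.le_ediv_iff_mul_le hpos]; omega
  rw [if_pos h2] at hrange
  obtain ⟨m, hm'⟩ : ∃ m, ((hm - e + e - 1) / e).toNat = m + 1 :=
    ⟨_, (Nat.succ_pred_eq_of_pos (by omega)).symm⟩
  have hinj : Function.Injective (fun k : Nat => e + e * (k:Int)) := by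
    intro a b hab
    simp only at hab
    have : (a:Int) = b := by
      have := mul_left_cancel₀ (ne_of_gt hpos) (by omega : e * (a:Int) = e * b)
      exact this
    exact_mod_cast this
  have hnodup : (PySem.List.pyRange e hm e).Nodup := by
    rw [hrange]; exact List.Nodup.map hinj List.nodup_range
  have hcons : PySem.List.pyRange e hm e =
      e :: (List.range m).map (fun k : Nat => e + e * ((k:Int) + 1)) := by
    rw [hrange, hm', List.range_succ_eq_map, List.map_cons, List.map_map]
    simp only [Function.comp_def, Nat.cast_zero, mul_zero, add_zero, Nat.succ_eq_add_one,
      Nat.cast_add, Nat.cast_one]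
  refine ⟨_, hcons, ?_, ?_⟩
  · intro hmem
    simp only [List.mem_map] at hmem
    obtain ⟨k, _, hk⟩ := hmem
    have hk0 : (0:Int) ≤ (k:Int) := Int.natCast_nonneg k
    have : e * ((k:Int) + 1) ≥ e := by nlinarith
    omega
  · intro x
    rw [← hcons]
    by_cases hx : x ∈ PySem.List.pyRange e hm e
    · rw [List.count_eq_one_of_mem hnodup hx]
      rw [PySem.List.mem_pyRange_iff_of_pos hpos] at hx
      obtain ⟨ha, hb, hc⟩ := hx
      rw [if_pos ⟨by have := dvd_add hc (dvd_refl e); simpa using this, ha, hb⟩]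
      exact Nat.cast_one
    · rw [List.count_eq_zero_of_not_mem hx]
      rw [PySem.List.mem_pyRange_iff_of_pos hpos] at hx
      rw [if_neg ?_]
      · rfl
      · rintro ⟨ha, hb, hc⟩
        exact hx ⟨hb, hc, (dvd_sub_right ha).mpr (dvd_refl e)⟩

-- σ(K) = (sum of proper divisors below K) + K
theorem pvSigma_split (K : Nat) (hK : 1 ≤ K) :
    (∑ d ∈ Finset.Ico 1 K, if d ∣ K then d else 0) + K = pvSigma K := by
  rw [pvSigma, show K.divisors = (Finset.Ico 1 (K + 1)).filter (· ∣ K) from rfl]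
  rw [Finset.sum_filter, Finset.sum_Ico_succ_top hK]
  rw [if_pos (dvd_refl K)]

-- houses[k] + k*10 at elf k's first visit is 10·σ(k)
theorem pvInv_self (hm : Int) (K : Nat) (hK : 1 ≤ K) (hlt : (K:Int) < hm) :
    pvInv hm (K:Int) (K:Int) + (K:Int) * 10 = 10 * ↑(pvSigma K) := by
  unfold pvInv
  rw [Int.toNat_natCast]
  have h1 : ∀ d ∈ Finset.Ico 1 K,
      (if ((d:Int) ∣ (K:Int) ∧ (d:Int) ≤ (K:Int) ∧ (K:Int) < hm) then (d:Int) * 10 else 0)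
        = (if d ∣ K then ((d:Int)) * 10 else 0) := by
    intro d hd
    simp only [Finset.mem_Ico] at hd
    by_cases hdk : d ∣ K
    · rw [if_pos hdk, if_pos ⟨Int.natCast_dvd_natCast.mpr hdk,
        by exact_mod_cast (by omega : d ≤ K), hlt⟩]
    · rw [if_neg ?_, if_neg hdk]
      rintro ⟨hc, -, -⟩
      exact hdk (Int.natCast_dvd_natCast.mp hc)
  rw [Finset.sum_congr rfl h1]
  have h2 : ∑ d ∈ Finset.Ico 1 K, (if d ∣ K then ((d:Int)) * 10 else 0)
      = ↑(∑ d ∈ Finset.Ico 1 K, if d ∣ K then d else 0) * 10 := by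
    rw [Nat.cast_sum, Finset.sum_mul]
    refine Finset.sum_congr rfl fun d _ => ?_
    split_ifs
    · rfl
    · simp
  rw [h2]
  have h3 := pvSigma_split K hK
  have h4 : ((∑ d ∈ Finset.Ico 1 K, if d ∣ K then d else 0 : Nat) : Int) + (K:Int)
      = ((pvSigma K : Nat) : Int) := by exact_mod_cast congrArg (Nat.cast (R := Int)) h3
  omega

-- the accumulated-value invariant advances by one elf
theorem pvInv_step (hm : Int) (K : Nat) (hK : 1 ≤ K) (x : Int) :
    pvInv hm ((K:Int) + 1) x
      = pvInv hm (K:Int) x + (if (K:Int) ∣ x ∧ (K:Int) ≤ x ∧ x < hm then (K:Int) * 10 else 0) := by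
  unfold pvInv
  rw [show (((K:Int)) + 1).toNat = K + 1 by omega, Int.toNat_natCast]
  rw [Finset.sum_Ico_succ_top hK]

-- main simulation: both outer loops agree given the accumulated-dict invariant
theorem pvMain (pi hm : Int) : ∀ (fuel : Nat) (k : Int) (h : PySem.Dict Int Int), 1 ≤ k → fuel = (hm - k).toNat →
    (∀ x, h.getD x 0 = pvInv hm k x) →
    pvOuterA pi hm (PySem.List.pyRange k hm 1) h = pvScanBGo pi hm fuel k := by
  intro fuel
  induction fuel with
  | zero =>
    intro k h hk hf hinv
    rw [PySem.List.pyRange_one_eq_nil (by omega)]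
    rfl
  | succ fuel ih =>
    intro k h hk hf hinv
    have hklt : k < hm := by omega
    obtain ⟨K, rfl⟩ : ∃ K : Nat, k = (K:Int) := ⟨k.toNat, (Int.toNat_of_nonneg (by omega)).symm⟩
    have hK1 : 1 ≤ K := by exact_mod_cast hk
    obtain ⟨rest, hvis, hnotin, hcount⟩ := pvVisits (K:Int) hm hk hklt
    rw [PySem.List.pyRange_one_cons hklt, pvOuterA, hvis, pvInnerA_cons pi _ rest h hnotin]
    have hcond : h.getD (K:Int) 0 + (K:Int) * 10 = 10 * ↑(pvSigma K) := by
      rw [hinv]; exact pvInv_self hm K hK1 hklt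
    have hB : pvDivSum (K:Int) 1 0 = ↑(pvSigma K) := by
      have := pvDivSum_sigma (K:Int) (by exact_mod_cast hK1)
      rwa [Int.toNat_natCast] at this
    rw [pvScanBGo, if_pos hklt, hB]
    by_cases hc : 10 * ((pvSigma K : Nat) : Int) > pi
    · rw [if_pos (by rw [hcond]; exact hc), if_pos hc]
    · rw [if_neg (by rw [hcond]; exact hc), if_neg hc]
      show pvOuterA pi hm (PySem.List.pyRange ((K:Int) + 1) hm 1) _ = pvScanBGo pi hm fuel ((K:Int) + 1)
      apply ih ((K:Int) + 1) _ (by omega) (by omega)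
      intro x
      rw [pvFoldModify, hinv, hcount x, pvInv_step hm K hK1 x]
      split_ifs
      · ring
      · ring

-- ===== VERDICT (by name: the statement is the Claim_ definition above) =====
theorem part1_spec : Claim_equal_part1 := by
  intro pi _
  unfold Spec_part1 part1 part1_alt pvScanB
  exact pvMain pi _ _ 1 PySem.Dict.empty le_rfl rfl (by
    intro x
    simp [pvInv, PySem.Dict.getD_empty])
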